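-- pv_equiv track=rewrite | github.com/jhpyyk/optofidelity-gcode-assignment | Parser.py | arrange_commands
-- ===== SOURCE A (Python) =====
-- def arrange_commands(commands):
--     arranged = []
--     for command in commands:
--         if (command[0][0] == 'F'):
--             arranged.append(command)
--
--     for command in commands:
--         if (command[0][0] == 'S'):
--             arranged.append(command)
--
--     for command in commands:
--         if (command[0][0] == 'T'):
--             arranged.append(command)
--
--     for command in commands:
--         if (command[0][0] == 'M'):
--             arranged.append(command)
--
--     for command in commands:
--         if (command[0][0] == 'G'):
--             arranged.append(command)
--
--     for command in commands:
--         if (command[0][0] == 'X'):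
--             arranged.append(command)
--
--     for command in commands:
--         if (command[0][0] == 'Y'):
--             arranged.append(command)
--
--     for command in commands:
--         if (command[0][0] == 'Z'):
--             arranged.append(command)
--
--     return arranged
-- ===== SOURCE B (Python) =====
-- ORDER = "FSTMGXYZ"
--
-- def arrange_commands(commands):
--     prioritized = [c for c in commands if c[0][0] in ORDER]
--     return sorted(prioritized, key=lambda c: ORDER.index(c[0][0]))
-- ===== Notes on version B (the rewrite author's own statement) =====
-- stated objective: simpler
-- what changed: Replaces A's eight separate passes over the list (one appending pass per prefix letter) with a single filter plus one stable sort keyed by the prefix letter's position in 'FSTMGXYZ'.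
import Mathlib
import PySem

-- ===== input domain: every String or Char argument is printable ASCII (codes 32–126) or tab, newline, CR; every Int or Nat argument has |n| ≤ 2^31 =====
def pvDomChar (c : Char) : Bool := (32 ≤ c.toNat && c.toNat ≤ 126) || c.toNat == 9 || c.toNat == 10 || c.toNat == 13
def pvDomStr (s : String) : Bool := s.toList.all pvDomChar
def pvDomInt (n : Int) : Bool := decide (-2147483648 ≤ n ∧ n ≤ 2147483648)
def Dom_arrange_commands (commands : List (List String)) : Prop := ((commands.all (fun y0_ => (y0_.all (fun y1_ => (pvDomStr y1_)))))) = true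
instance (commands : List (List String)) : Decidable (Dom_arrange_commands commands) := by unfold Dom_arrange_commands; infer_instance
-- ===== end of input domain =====

-- B replaces A's eight appending passes (one per prefix letter) by one filter plus one
-- stable sort keyed by the prefix letter's position in "FSTMGXYZ" (objective: simpler).

-- command[0][0] : first character of the first string of a command (none = IndexError)
def pvFirst? (c : List String) : Option Char :=
  (PySem.List.pyGet? c 0).bind (fun s => PySem.Str.pyGet? s 0)

-- ===== PORT A =====
def arrange_commands (commands : List (List String)) : List (List String) :=
  let a1 := commands.foldl (fun acc c => if pvFirst? c == some 'F' then acc ++ [c] else acc) []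
  let a2 := commands.foldl (fun acc c => if pvFirst? c == some 'S' then acc ++ [c] else acc) a1
  let a3 := commands.foldl (fun acc c => if pvFirst? c == some 'T' then acc ++ [c] else acc) a2
  let a4 := commands.foldl (fun acc c => if pvFirst? c == some 'M' then acc ++ [c] else acc) a3
  let a5 := commands.foldl (fun acc c => if pvFirst? c == some 'G' then acc ++ [c] else acc) a4
  let a6 := commands.foldl (fun acc c => if pvFirst? c == some 'X' then acc ++ [c] else acc) a5
  let a7 := commands.foldl (fun acc c => if pvFirst? c == some 'Y' then acc ++ [c] else acc) a6
  let a8 := commands.foldl (fun acc c => if pvFirst? c == some 'Z' then acc ++ [c] else acc) a7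
  a8

-- ===== PORT B =====
-- ORDER = "FSTMGXYZ" (as its character list)
def pvOrder : List Char := ['F', 'S', 'T', 'M', 'G', 'X', 'Y', 'Z']

-- key = ORDER.index(c[0][0]); the .getD defaults are only reachable where the Python
-- raises (empty command / empty first string: outside Pre_; char absent from ORDER:
-- impossible after the filter), so B's port is exact on all admitted inputs.
def pvKeyB (c : List String) : Nat :=
  (PySem.List.index? pvOrder ((pvFirst? c).getD ' ')).getD 0

def arrange_commands_alt (commands : List (List String)) : List (List String) :=
  let prioritized := commands.filter (fun c => decide ((pvFirst? c).getD ' ' ∈ pvOrder))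
  PySem.List.sorted prioritized pvKeyB false

-- ===== PRECONDITION & SPEC =====
-- Pre_ excludes exactly the inputs on which the Python A raises IndexError:
-- a command that is an empty list, or whose first string is empty.
def Pre_arrange_commands (commands : List (List String)) : Prop :=
  ∀ c ∈ commands, c ≠ [] ∧ c.headD "" ≠ ""
instance (commands : List (List String)) : Decidable (Pre_arrange_commands commands) := by
  unfold Pre_arrange_commands; infer_instance

def pvWitness_arrange_commands : List (List String) :=
  [["G1", "P2"], ["F30"], ["M104"], ["Q7"], ["G28"]]

def Spec_arrange_commands (commands : List (List String)) (out : List (List String)) : Prop :=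
  out = arrange_commands_alt commands
instance (commands : List (List String)) (out : List (List String)) : Decidable (Spec_arrange_commands commands out) := by
  unfold Spec_arrange_commands; infer_instance

-- ===== CLAIM (what is proved, stated in full; the proofs are below) =====
def Claim_equal_arrange_commands : Prop := ∀ (commands : List (List String)), Dom_arrange_commands commands → Pre_arrange_commands commands → Spec_arrange_commands commands (arrange_commands commands)

-- ===== LEMMAS AND PROOFS =====

-- an appending pass of A is a filter
lemma pvFoldlFilter (p : List String → Bool) (l : List (List String)) (acc : List (List String)) :
    List.foldl (fun acc c => if p c then acc ++ [c] else acc) acc l = acc ++ l.filter p := by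
  induction l generalizing acc with
  | nil => simp
  | cons x xs ih => by_cases h : p x <;> simp [h, ih]

lemma pvFlatMapCongr {α β : Type} (l : List α) (f g : α → List β) (h : ∀ a ∈ l, f a = g a) :
    l.flatMap f = l.flatMap g := by
  induction l with
  | nil => rfl
  | cons a as ih =>
    simp only [List.flatMap_cons, h a (by simp), ih (fun b hb => h b (by simp [hb]))]

-- stable insertion lands at the end of its own key group
lemma pvInsertBetween {α : Type} (key : α → Nat) (x : α) (L2 : List α)
    (h2 : ∀ a ∈ L2, key x < key a) :
    ∀ L1 : List α, (∀ a ∈ L1, ¬ key x < key a) →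
      PySem.List.insertBy (fun a b => decide (key a < key b)) x (L1 ++ L2) = L1 ++ x :: L2 := by
  intro L1
  induction L1 with
  | nil =>
    intro _
    cases L2 with
    | nil => rfl
    | cons b bs =>
      have hb := h2 b (by simp)
      simp [PySem.List.insertBy, hb]
  | cons a as ih =>
    intro h1
    have ha := h1 a (by simp)
    have hrec := ih (fun y hy => h1 y (by simp [hy]))
    simp [PySem.List.insertBy, ha, hrec]

-- Python's stable sort by a key ranging over the strictly increasing key list ks
-- is the concatenation of the per-key groups, each in original order.
lemma pvSortedGroups {α : Type} (key : α → Nat) (ks : List Nat) (hks : ks.Pairwise (· < ·)) :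
    ∀ xs : List α, (∀ x ∈ xs, key x ∈ ks) →
      PySem.List.sorted xs key false
        = ks.flatMap (fun k => xs.filter (fun y => decide (key y = k))) := by
  intro xs
  induction xs using List.reverseRecOn with
  | nil => intro _; simp [PySem.List.sorted]
  | append_singleton xs x ih =>
    intro hmem
    have hx : key x ∈ ks := hmem x (by simp)
    obtain ⟨ks1, ks2, hsp⟩ := List.append_of_mem hx
    subst hsp
    rw [List.pairwise_append] at hks
    obtain ⟨hp1, hp2, h12⟩ := hks
    have hstep : PySem.List.sorted (xs ++ [x]) key false
        = PySem.List.insertBy (fun a b => decide (key a < key b)) x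
            (PySem.List.sorted xs key false) := by
      rw [PySem.List.sorted_eq_foldl_insertBy, PySem.List.sorted_eq_foldl_insertBy,
        List.foldl_append]
      rfl
    rw [hstep, ih (fun y hy => hmem y (by simp [hy]))]
    set g : Nat → List α := fun k => xs.filter (fun y => decide (key y = k)) with hg
    have lhs1 : (ks1 ++ key x :: ks2).flatMap g
        = (ks1.flatMap g ++ g (key x)) ++ ks2.flatMap g := by
      simp [List.flatMap_append, List.flatMap_cons, List.append_assoc]
    rw [lhs1, pvInsertBetween key x (ks2.flatMap g) ?h2 (ks1.flatMap g ++ g (key x)) ?h1]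
    case h2 =>
      intro a ha
      obtain ⟨k, hk, hak⟩ := List.mem_flatMap.1 ha
      have : key a = k := by simpa [hg] using (List.mem_filter.1 hak).2
      rw [this]
      exact (List.pairwise_cons.1 hp2).1 k hk
    case h1 =>
      intro a ha
      rcases List.mem_append.1 ha with ha | ha
      · obtain ⟨k, hk, hak⟩ := List.mem_flatMap.1 ha
        have hka : key a = k := by simpa [hg] using (List.mem_filter.1 hak).2
        have : k < key x := h12 k hk (key x) (by simp)
        omega
      · have : key a = key x := by simpa [hg] using (List.mem_filter.1 ha).2
        omega
    · -- both sides equal after splitting the new element into its group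
      have rhs1 : ∀ k, (xs ++ [x]).filter (fun y => decide (key y = k))
          = g k ++ (if key x = k then [x] else []) := by
        intro k
        simp only [List.filter_append, hg]
        congr 1
        by_cases h : key x = k <;> simp [h]
      have e1 : ks1.flatMap (fun k => (xs ++ [x]).filter (fun y => decide (key y = k)))
          = ks1.flatMap g := by
        refine pvFlatMapCongr _ _ _ (fun k hk => ?_)
        have : k < key x := h12 k hk (key x) (by simp)
        rw [rhs1 k, if_neg (by omega), List.append_nil]
      have e2 : ks2.flatMap (fun k => (xs ++ [x]).filter (fun y => decide (key y = k)))
          = ks2.flatMap g := by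
        refine pvFlatMapCongr _ _ _ (fun k hk => ?_)
        have : key x < k := (List.pairwise_cons.1 hp2).1 k hk
        rw [rhs1 k, if_neg (by omega), List.append_nil]
      rw [List.flatMap_append, List.flatMap_cons, e1, e2, rhs1 (key x), if_pos rfl]
      simp [List.append_assoc]

lemma pvKeyMem (ch : Char) (h : ch ∈ pvOrder) :
    (PySem.List.index? pvOrder ch).getD 0 ∈ ([0, 1, 2, 3, 4, 5, 6, 7] : List Nat) := by
  simp only [pvOrder, List.mem_cons, List.not_mem_nil, or_false] at h
  rcases h with rfl | rfl | rfl | rfl | rfl | rfl | rfl | rfl <;> decide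

-- pointwise: "kept by the filter with key k" = "first char is the k-th letter of ORDER"
lemma pvPoint (k : Nat) (x : Char)
    (hkx : (k = 0 ∧ x = 'F') ∨ (k = 1 ∧ x = 'S') ∨ (k = 2 ∧ x = 'T') ∨ (k = 3 ∧ x = 'M') ∨
           (k = 4 ∧ x = 'G') ∨ (k = 5 ∧ x = 'X') ∨ (k = 6 ∧ x = 'Y') ∨ (k = 7 ∧ x = 'Z'))
    (c : List String) :
    (decide (pvKeyB c = k) && decide ((pvFirst? c).getD ' ' ∈ pvOrder))
      = (pvFirst? c == some x) := by
  cases hfc : pvFirst? c with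
  | none =>
    simp only [pvKeyB, hfc, Option.getD_none]
    have hL : (' ' : Char) ∉ pvOrder := by decide
    rw [Bool.eq_iff_iff]
    simp only [Bool.and_eq_true, decide_eq_true_eq]
    constructor
    · rintro ⟨-, h⟩; exact absurd h hL
    · intro h; exact Bool.noConfusion h
  | some ch =>
    simp only [pvKeyB, hfc, Option.getD_some]
    by_cases hm : ch ∈ pvOrder
    · have hm' : ch = 'F' ∨ ch = 'S' ∨ ch = 'T' ∨ ch = 'M' ∨ ch = 'G' ∨ ch = 'X' ∨
          ch = 'Y' ∨ ch = 'Z' := by simpa [pvOrder] using hm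
      rcases hkx with ⟨rfl, rfl⟩ | ⟨rfl, rfl⟩ | ⟨rfl, rfl⟩ | ⟨rfl, rfl⟩ | ⟨rfl, rfl⟩ |
        ⟨rfl, rfl⟩ | ⟨rfl, rfl⟩ | ⟨rfl, rfl⟩ <;>
        rcases hm' with rfl | rfl | rfl | rfl | rfl | rfl | rfl | rfl <;> decide
    · have hxmem : x ∈ pvOrder := by
        rcases hkx with ⟨-, rfl⟩ | ⟨-, rfl⟩ | ⟨-, rfl⟩ | ⟨-, rfl⟩ | ⟨-, rfl⟩ | ⟨-, rfl⟩ |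
          ⟨-, rfl⟩ | ⟨-, rfl⟩ <;> decide
      rw [Bool.eq_iff_iff]
      simp only [Bool.and_eq_true, decide_eq_true_eq, beq_iff_eq, Option.some.injEq]
      constructor
      · rintro ⟨-, hmem2⟩; exact absurd hmem2 hm
      · rintro rfl; exact absurd hxmem hm

set_option maxHeartbeats 2000000 in
-- ===== VERDICT (by name: the statement is the Claim_ definition above) =====
theorem arrange_commands_spec : Claim_equal_arrange_commands := by
  unfold Claim_equal_arrange_commands
  intro commands _ _
  unfold Spec_arrange_commands arrange_commands arrange_commands_alt
  simp only [pvFoldlFilter, List.nil_append]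
  rw [pvSortedGroups pvKeyB [0, 1, 2, 3, 4, 5, 6, 7] (by decide) _ ?hk]
  case hk =>
    intro c hc
    have hq := (List.mem_filter.1 hc).2
    exact pvKeyMem _ (by simpa using hq)
  simp only [List.flatMap_cons, List.flatMap_nil, List.append_nil, List.filter_filter]
  rw [List.filter_congr (fun c _ => pvPoint 0 'F' (Or.inl ⟨rfl, rfl⟩) c),
      List.filter_congr (fun c _ => pvPoint 1 'S' (Or.inr (Or.inl ⟨rfl, rfl⟩)) c),
      List.filter_congr (fun c _ => pvPoint 2 'T' (Or.inr (Or.inr (Or.inl ⟨rfl, rfl⟩))) c),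
      List.filter_congr (fun c _ => pvPoint 3 'M' (Or.inr (Or.inr (Or.inr (Or.inl ⟨rfl, rfl⟩)))) c),
      List.filter_congr (fun c _ => pvPoint 4 'G' (Or.inr (Or.inr (Or.inr (Or.inr (Or.inl ⟨rfl, rfl⟩))))) c),
      List.filter_congr (fun c _ => pvPoint 5 'X' (Or.inr (Or.inr (Or.inr (Or.inr (Or.inr (Or.inl ⟨rfl, rfl⟩)))))) c),
      List.filter_congr (fun c _ => pvPoint 6 'Y' (Or.inr (Or.inr (Or.inr (Or.inr (Or.inr (Or.inr (Or.inl ⟨rfl, rfl⟩))))))) c),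
      List.filter_congr (fun c _ => pvPoint 7 'Z' (Or.inr (Or.inr (Or.inr (Or.inr (Or.inr (Or.inr (Or.inr (⟨rfl, rfl⟩)))))))) c)]
  simp [List.append_assoc]
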